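-- pv_equiv track=rewrite | github.com/yumeng-wang/Stats507 | PS 1 - 5/PS 2/Problem Set 2.py | select_c
-- ===== SOURCE A (Python) =====
-- def select_c(sample_list, id1=0, id2=2):
--     """
--     This function collect the tuple having the largest element in the specific index
--     with the sample element in the specific index.
--
--     Parameters
--     ----------
--     sample_list : list
--         list of n k-tuples.
--     idx1 : int, optional
--         indict the index to choose the tuple having the largest element. The default
--         is 0.
--     idx2 : int, optional
--         indict the index to choose the tuple having the sample element. The default
--         is 2.
--
--     Returns
--     -------
--     List.
--
--     """
--     res = []
--     dict = {}
--     for x in sample_list: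
--         if x[id1] not in dict.keys():
--             dict[x[id1]] = [x]
--         else:
--             if x[id2] > dict[x[id1]][0][id2]:
--                 dict[x[id1]] = [x]
--             elif x[id2] == dict[x[id1]][0][id2]:
--                 dict[x[id1]].append(x)
--     for value in dict.values():
--         res.extend(value)
--     return res
-- ===== SOURCE B (Python) =====
-- def select_c(sample_list, id1=0, id2=2):
--     # Pass 1: map each id1-key to the maximum id2-value seen for it.
--     max_table = {}
--     for x in sample_list:
--         k = x[id1]
--         v = x[id2]
--         if k not in max_table or v > max_table[k]:
--             max_table[k] = v
--     # Pass 2: collect, per key, the tuples attaining that maximum, in order.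
--     groups = {}
--     for x in sample_list:
--         if x[id2] == max_table[x[id1]]:
--             groups.setdefault(x[id1], []).append(x)
--     # Emit groups in first-appearance order of keys.
--     res = []
--     for k in max_table:
--         res.extend(groups.get(k, []))
--     return res
-- ===== Notes on version B (the rewrite author's own statement) =====
-- stated objective: alternative
-- what changed: Replaces A's single pass that maintains per-key candidate lists with a running max (rebuilding/appending as larger ties arrive) by two passes: first build a key->max-id2 table, then filter the list for tuples attaining their key's max, emitting groups in the table's first-appearance key order.
-- outside the precondition, e.g. on select_c([(5,)], 0, 3): A returns [(5,)], B raises IndexError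
import Mathlib
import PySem

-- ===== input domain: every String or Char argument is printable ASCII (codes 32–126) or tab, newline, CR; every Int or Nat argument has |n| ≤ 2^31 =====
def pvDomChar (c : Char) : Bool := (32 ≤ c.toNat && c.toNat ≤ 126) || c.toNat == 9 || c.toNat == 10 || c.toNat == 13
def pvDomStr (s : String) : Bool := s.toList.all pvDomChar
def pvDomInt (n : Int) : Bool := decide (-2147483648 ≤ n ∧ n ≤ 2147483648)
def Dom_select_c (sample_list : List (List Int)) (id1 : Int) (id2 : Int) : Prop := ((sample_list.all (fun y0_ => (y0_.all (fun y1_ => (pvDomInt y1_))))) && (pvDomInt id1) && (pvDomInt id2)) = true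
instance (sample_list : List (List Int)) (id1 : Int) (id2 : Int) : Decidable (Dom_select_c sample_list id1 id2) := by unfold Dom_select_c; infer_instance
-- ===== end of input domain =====

-- B replaces A's one-pass dict of running-max candidate lists by a max-table pass plus a
-- filtering pass (alternative decomposition, similar cost); the return values are proved equal.

-- ===== PORT A =====
-- the body of A's 'for x in sample_list' loop; 'dict[x[id1]][0][id2]' is read with pyGetD —
-- within Pre_ every index is in range and the stored list is nonempty, so no default is used
def select_c_step (id1 id2 : Int) (d : PySem.Dict Int (List (List Int))) (x : List Int) :
    PySem.Dict Int (List (List Int)) :=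
  let k := PySem.List.pyGetD x id1 (0 : Int)
  if !(d.contains k) then
    d.insert k [x]
  else
    let cur := d.getD k []
    if PySem.List.pyGetD x id2 (0 : Int) > PySem.List.pyGetD (PySem.List.pyGetD cur 0 []) id2 (0 : Int) then
      d.insert k [x]
    else if PySem.List.pyGetD x id2 (0 : Int) == PySem.List.pyGetD (PySem.List.pyGetD cur 0 []) id2 (0 : Int) then
      d.insert k (cur ++ [x])
    else d

def select_c (sample_list : List (List Int)) (id1 : Int) (id2 : Int) : List (List Int) :=
  let d := sample_list.foldl (select_c_step id1 id2) PySem.Dict.empty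
  d.values.foldl (fun res v => res ++ v) []

-- ===== PORT B =====
-- Source B pass 1: max_table maps each id1-key to the max id2-value seen for it
def select_c_alt_step1 (id1 id2 : Int) (t : PySem.Dict Int Int) (x : List Int) :
    PySem.Dict Int Int :=
  let k := PySem.List.pyGetD x id1 (0 : Int)
  let v := PySem.List.pyGetD x id2 (0 : Int)
  if !(t.contains k) || v > t.getD k 0 then t.insert k v else t

-- Source B pass 2: groups.setdefault(k, []).append(x) for tuples attaining their key's max
-- ('max_table[x[id1]]' is read via getD: within Pre_ the key is always present)
def select_c_alt_step2 (id1 id2 : Int) (table : PySem.Dict Int Int)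
    (g : PySem.Dict Int (List (List Int))) (x : List Int) :
    PySem.Dict Int (List (List Int)) :=
  if PySem.List.pyGetD x id2 (0 : Int) == table.getD (PySem.List.pyGetD x id1 (0 : Int)) 0 then
    g.modify (PySem.List.pyGetD x id1 (0 : Int)) [] (· ++ [x])
  else g

def select_c_alt (sample_list : List (List Int)) (id1 : Int) (id2 : Int) : List (List Int) :=
  let table := sample_list.foldl (select_c_alt_step1 id1 id2) PySem.Dict.empty
  let groups := sample_list.foldl (select_c_alt_step2 id1 id2 table) PySem.Dict.empty
  table.keys.foldl (fun res k => res ++ groups.getD k []) []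

-- ===== PRECONDITION & SPEC =====
-- Pre_ requires both indices in range for EVERY row (else Python raises IndexError). A reads
-- x[id2] lazily — only when a key repeats — so on some inputs with a row lacking index id2
-- A still returns while the natural two-pass B raises IndexError; those are excluded (see cites).
def Pre_select_c (sample_list : List (List Int)) (id1 : Int) (id2 : Int) : Prop :=
  ∀ x ∈ sample_list, PySem.Raise.InRange x.length id1 ∧ PySem.Raise.InRange x.length id2
instance (sample_list : List (List Int)) (id1 : Int) (id2 : Int) : Decidable (Pre_select_c sample_list id1 id2) := by unfold Pre_select_c; infer_instance

def pvWitness_select_c : List (List Int) × Int × Int := ([[1, 2, 3], [1, 5, 9], [2, 0, 4], [1, 7, 9]], 0, 2)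

def Spec_select_c (sample_list : List (List Int)) (id1 : Int) (id2 : Int) (out : List (List Int)) : Prop := out = select_c_alt sample_list id1 id2
instance (sample_list : List (List Int)) (id1 : Int) (id2 : Int) (out : List (List Int)) : Decidable (Spec_select_c sample_list id1 id2 out) := by unfold Spec_select_c; infer_instance

-- ===== CLAIM (what is proved, stated in full; the proofs are below) =====
def Claim_equal_select_c : Prop := ∀ (sample_list : List (List Int)) (id1 : Int) (id2 : Int), Dom_select_c sample_list id1 id2 → Pre_select_c sample_list id1 id2 → Spec_select_c sample_list id1 id2 (select_c sample_list id1 id2)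

-- ===== LEMMAS AND PROOFS =====

-- key and value of a row (exactly the totalised reads the ports use)
def pvK (id1 : Int) (x : List Int) : Int := PySem.List.pyGetD x id1 0
def pvV (id2 : Int) (x : List Int) : Int := PySem.List.pyGetD x id2 0

-- the id2-values of the rows of l whose key is k, in order
def pvVs (id1 id2 k : Int) (l : List (List Int)) : List Int :=
  (l.filter (fun x => pvK id1 x == k)).map (pvV id2)

-- Python-style max of a list (only used on nonempty lists)
def pvFold (vs : List Int) : Int := vs.foldl max (vs.headD 0)

-- maximum id2-value among rows of l with key k
def pvMax (id1 id2 k : Int) (l : List (List Int)) : Int := pvFold (pvVs id1 id2 k l)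

-- the rows of l with key k attaining pvMax, in order
def pvGrp (id1 id2 k : Int) (l : List (List Int)) : List (List Int) :=
  l.filter (fun x => pvK id1 x == k && pvV id2 x == pvMax id1 id2 k l)

theorem pv_le_foldl_max_init (l : List Int) (b : Int) : b ≤ l.foldl max b := by
  induction l generalizing b with
  | nil => simp
  | cons a t ih => exact le_trans (le_max_left b a) (ih (max b a))

theorem pv_mem_le_foldl_max (l : List Int) (b v : Int) (h : v ∈ l) : v ≤ l.foldl max b := by
  induction l generalizing b with
  | nil => simp at h
  | cons a t ih =>
    rcases List.mem_cons.mp h with rfl | h'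
    · exact le_trans (le_max_right b v) (pv_le_foldl_max_init t _)
    · exact ih _ h'

theorem pv_foldl_max_mem (l : List Int) (b : Int) : l.foldl max b = b ∨ l.foldl max b ∈ l := by
  induction l generalizing b with
  | nil => left; rfl
  | cons a t ih =>
    rcases ih (max b a) with h | h
    · rcases max_choice b a with hc | hc
      · left; rw [List.foldl_cons, h, hc]
      · right; rw [List.foldl_cons, h, hc]; exact List.mem_cons_self
    · right; exact List.mem_cons_of_mem _ h

theorem pvFold_append (vs : List Int) (v : Int) :
    pvFold (vs ++ [v]) = if vs = [] then v else max (pvFold vs) v := by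
  cases vs with
  | nil => simp [pvFold]
  | cons a t => simp [pvFold, List.foldl_append]

theorem pvFold_cons (a : Int) (t : List Int) : pvFold (a :: t) = t.foldl max a := by
  simp [pvFold, List.foldl_cons]

theorem pvFold_mem (vs : List Int) (h : vs ≠ []) : pvFold vs ∈ vs := by
  cases vs with
  | nil => exact absurd rfl h
  | cons a t =>
    rw [pvFold_cons]
    rcases pv_foldl_max_mem t a with hm | hm
    · rw [hm]; exact List.mem_cons_self
    · exact List.mem_cons_of_mem _ hm

theorem pv_le_pvFold (vs : List Int) (v : Int) (h : v ∈ vs) : v ≤ pvFold vs := by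
  cases vs with
  | nil => simp at h
  | cons a t =>
    rw [pvFold_cons]
    rcases List.mem_cons.mp h with rfl | h'
    · exact pv_le_foldl_max_init t v
    · exact pv_mem_le_foldl_max t _ v h'

theorem pvVs_nil_iff (id1 id2 k : Int) (l : List (List Int)) :
    pvVs id1 id2 k l = [] ↔ k ∉ l.map (pvK id1) := by
  simp only [pvVs, List.map_eq_nil_iff, List.filter_eq_nil_iff, beq_iff_eq, List.mem_map,
    not_exists]
  tauto

theorem pvVs_append (id1 id2 k : Int) (l : List (List Int)) (x : List Int) :
    pvVs id1 id2 k (l ++ [x]) =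
      pvVs id1 id2 k l ++ (if pvK id1 x = k then [pvV id2 x] else []) := by
  by_cases h : pvK id1 x = k <;> simp [pvVs, List.filter_append, h]

theorem pvMax_append_ne (id1 id2 k : Int) (l : List (List Int)) (x : List Int)
    (h : pvK id1 x ≠ k) : pvMax id1 id2 k (l ++ [x]) = pvMax id1 id2 k l := by
  simp [pvMax, pvVs_append, h]

theorem pvGrp_append_ne (id1 id2 k : Int) (l : List (List Int)) (x : List Int)
    (h : pvK id1 x ≠ k) : pvGrp id1 id2 k (l ++ [x]) = pvGrp id1 id2 k l := by
  simp [pvGrp, List.filter_append, pvMax_append_ne id1 id2 k l x h, h]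

theorem pvMax_append_self (id1 id2 : Int) (l : List (List Int)) (x : List Int) :
    pvMax id1 id2 (pvK id1 x) (l ++ [x]) =
      if pvK id1 x ∈ l.map (pvK id1) then max (pvMax id1 id2 (pvK id1 x) l) (pvV id2 x)
      else pvV id2 x := by
  rw [pvMax, pvVs_append, if_pos rfl, pvFold_append]
  by_cases h : pvK id1 x ∈ l.map (pvK id1)
  · rw [if_neg ((not_iff_not.mpr (pvVs_nil_iff id1 id2 _ l)).mpr (not_not_intro h)), if_pos h]; rfl
  · rw [if_pos ((pvVs_nil_iff id1 id2 _ l).mpr h), if_neg h]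

theorem pv_mem_grp (id1 id2 k : Int) (l : List (List Int)) (y : List Int)
    (h : y ∈ pvGrp id1 id2 k l) :
    y ∈ l ∧ pvK id1 y = k ∧ pvV id2 y = pvMax id1 id2 k l := by
  rw [pvGrp, List.mem_filter] at h
  rcases h with ⟨h1, h2⟩
  simp only [Bool.and_eq_true, beq_iff_eq] at h2
  exact ⟨h1, h2.1, h2.2⟩

theorem pv_le_max (id1 id2 k : Int) (l : List (List Int)) (y : List Int)
    (hy : y ∈ l) (hk : pvK id1 y = k) : pvV id2 y ≤ pvMax id1 id2 k l := by
  apply pv_le_pvFold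
  simp only [pvVs, List.mem_map]
  exact ⟨y, List.mem_filter.mpr ⟨hy, by simp [hk]⟩, rfl⟩

theorem pvGrp_ne_nil (id1 id2 k : Int) (l : List (List Int))
    (h : k ∈ l.map (pvK id1)) : pvGrp id1 id2 k l ≠ [] := by
  have hvs : pvVs id1 id2 k l ≠ [] := by
    intro hc; exact absurd ((pvVs_nil_iff id1 id2 k l).mp hc) (not_not_intro h)
  have hm := pvFold_mem _ hvs
  simp only [pvVs, List.mem_map] at hm
  rcases hm with ⟨y, hyf, hyv⟩
  rcases List.mem_filter.mp hyf with ⟨hyl, hyk⟩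
  intro hc
  have : y ∈ pvGrp id1 id2 k l := by
    rw [pvGrp, List.mem_filter]
    refine ⟨hyl, ?_⟩
    simp only [Bool.and_eq_true, beq_iff_eq]
    exact ⟨by simpa using hyk, by rw [hyv]; rfl⟩
  rw [hc] at this; simp at this

-- value read at the head of the stored group equals the running maximum
theorem pv_head_grp (id1 id2 k : Int) (l : List (List Int)) (h : k ∈ l.map (pvK id1)) :
    pvV id2 (PySem.List.pyGetD (pvGrp id1 id2 k l) 0 []) = pvMax id1 id2 k l := by
  rcases List.exists_cons_of_ne_nil (pvGrp_ne_nil id1 id2 k l h) with ⟨a, t, he⟩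
  rw [he, PySem.List.pyGetD_zero_cons]
  have : a ∈ pvGrp id1 id2 k l := by rw [he]; exact List.mem_cons_self
  exact (pv_mem_grp id1 id2 k l a this).2.2

theorem pvGrp_append_fresh (id1 id2 : Int) (l : List (List Int)) (x : List Int)
    (h : pvK id1 x ∉ l.map (pvK id1)) :
    pvGrp id1 id2 (pvK id1 x) (l ++ [x]) = [x] := by
  rw [pvGrp, List.filter_append]
  have h1 : l.filter (fun y => pvK id1 y == pvK id1 x && pvV id2 y == pvMax id1 id2 (pvK id1 x) (l ++ [x])) = [] := by
    rw [List.filter_eq_nil_iff]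
    intro y hy
    simp only [Bool.and_eq_true, beq_iff_eq, not_and]
    intro hk _
    exact h (List.mem_map.mpr ⟨y, hy, hk⟩)
  have h2 : pvMax id1 id2 (pvK id1 x) (l ++ [x]) = pvV id2 x := by
    rw [pvMax_append_self, if_neg h]
  rw [h1, List.nil_append]
  simp [h2]

theorem pvGrp_append_gt (id1 id2 : Int) (l : List (List Int)) (x : List Int)
    (hmem : pvK id1 x ∈ l.map (pvK id1))
    (h : pvV id2 x > pvMax id1 id2 (pvK id1 x) l) :
    pvGrp id1 id2 (pvK id1 x) (l ++ [x]) = [x] := by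
  have hmax : pvMax id1 id2 (pvK id1 x) (l ++ [x]) = pvV id2 x := by
    rw [pvMax_append_self, if_pos hmem, max_eq_right (le_of_lt h)]
  rw [pvGrp, List.filter_append]
  have h1 : l.filter (fun y => pvK id1 y == pvK id1 x && pvV id2 y == pvMax id1 id2 (pvK id1 x) (l ++ [x])) = [] := by
    rw [List.filter_eq_nil_iff]
    intro y hy
    simp only [hmax, Bool.and_eq_true, beq_iff_eq, not_and]
    intro hk hv
    exact absurd h (not_lt.mpr (hv ▸ pv_le_max id1 id2 _ l y hy hk))
  rw [h1, List.nil_append]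
  simp [hmax]

theorem pvGrp_append_eq (id1 id2 : Int) (l : List (List Int)) (x : List Int)
    (hmem : pvK id1 x ∈ l.map (pvK id1))
    (h : pvV id2 x = pvMax id1 id2 (pvK id1 x) l) :
    pvGrp id1 id2 (pvK id1 x) (l ++ [x]) = pvGrp id1 id2 (pvK id1 x) l ++ [x] := by
  have hmax : pvMax id1 id2 (pvK id1 x) (l ++ [x]) = pvMax id1 id2 (pvK id1 x) l := by
    rw [pvMax_append_self, if_pos hmem, ← h, max_self]
  rw [pvGrp, List.filter_append, hmax, ← pvGrp]
  simp [h]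

theorem pvGrp_append_lt (id1 id2 : Int) (l : List (List Int)) (x : List Int)
    (hmem : pvK id1 x ∈ l.map (pvK id1))
    (h : pvV id2 x < pvMax id1 id2 (pvK id1 x) l) :
    pvGrp id1 id2 (pvK id1 x) (l ++ [x]) = pvGrp id1 id2 (pvK id1 x) l := by
  have hmax : pvMax id1 id2 (pvK id1 x) (l ++ [x]) = pvMax id1 id2 (pvK id1 x) l := by
    rw [pvMax_append_self, if_pos hmem, max_eq_left (le_of_lt h)]
  rw [pvGrp, List.filter_append, hmax, ← pvGrp]
  simp [ne_of_lt h]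

theorem pv_set_add (s : PySem.Set Int) (y : Int) :
    PySem.Set.add s y = if y ∈ s then s else s ++ [y] := by
  simp only [PySem.Set.add]
  by_cases h : y ∈ s <;> simp [h]

theorem pv_keys_new (id1 : Int) (l : List (List Int)) (x : List Int) :
    PySem.Set.ofList ((l ++ [x]).map (pvK id1)) =
      if pvK id1 x ∈ l.map (pvK id1) then PySem.Set.ofList (l.map (pvK id1))
      else PySem.Set.ofList (l.map (pvK id1)) ++ [pvK id1 x] := by
  rw [List.map_append, PySem.Set.ofList_append, List.map_singleton,
    PySem.Set.update_cons, PySem.Set.update_nil, pv_set_add]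
  by_cases h : pvK id1 x ∈ l.map (pvK id1)
  · rw [if_pos ((PySem.Set.mem_ofList _ _).mpr h), if_pos h]
  · rw [if_neg (fun hc => h ((PySem.Set.mem_ofList _ _).mp hc)), if_neg h]

-- ===== the invariant of A's loop =====
theorem pv_invA (id1 id2 : Int) (l : List (List Int)) :
    (l.foldl (select_c_step id1 id2) PySem.Dict.empty).keys = PySem.Set.ofList (l.map (pvK id1)) ∧
    ∀ k, (l.foldl (select_c_step id1 id2) PySem.Dict.empty).get? k =
      if k ∈ l.map (pvK id1) then some (pvGrp id1 id2 k l) else none := by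
  induction l using List.reverseRecOn with
  | nil => exact ⟨rfl, fun k => rfl⟩
  | append_singleton l x ih =>
    rcases ih with ⟨ihk, ihg⟩
    rw [List.foldl_append, List.foldl_cons, List.foldl_nil]
    set d := l.foldl (select_c_step id1 id2) PySem.Dict.empty with hd
    have hcont : d.contains (pvK id1 x) = true ↔ pvK id1 x ∈ l.map (pvK id1) := by
      rw [PySem.Dict.contains_iff_mem_keys, ihk, PySem.Set.mem_ofList]
    by_cases hmem : pvK id1 x ∈ l.map (pvK id1)
    · -- key already present
      have hc : d.contains (pvK id1 x) = true := hcont.mpr hmem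
      have hget : d.get? (pvK id1 x) = some (pvGrp id1 id2 (pvK id1 x) l) := by
        rw [ihg, if_pos hmem]
      have hgetD' : d.getD (PySem.List.pyGetD x id1 (0 : Int)) [] = pvGrp id1 id2 (pvK id1 x) l :=
        PySem.Dict.getD_of_get?_eq_some d [] hget
      have hhead' : PySem.List.pyGetD (PySem.List.pyGetD (d.getD (PySem.List.pyGetD x id1 (0 : Int)) []) 0 []) id2 (0 : Int)
          = pvMax id1 id2 (pvK id1 x) l := by
        rw [hgetD']; exact pv_head_grp id1 id2 (pvK id1 x) l hmem
      have hstep : select_c_step id1 id2 d x =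
          if pvV id2 x > pvMax id1 id2 (pvK id1 x) l then
            d.insert (pvK id1 x) [x]
          else if pvV id2 x == pvMax id1 id2 (pvK id1 x) l then
            d.insert (pvK id1 x) (pvGrp id1 id2 (pvK id1 x) l ++ [x])
          else d := by
        simp only [select_c_step]
        rw [show d.contains (PySem.List.pyGetD x id1 (0 : Int)) = true from hc]
        simp only [Bool.not_true, Bool.false_eq_true, if_false]
        rw [hhead', hgetD']
        rfl
      refine ⟨?_, ?_⟩
      · rw [hstep, pv_keys_new, if_pos hmem, ← ihk]
        split_ifs with h1 h2
        · exact PySem.Dict.keys_insert_of_contains d _ hc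
        · exact PySem.Dict.keys_insert_of_contains d _ hc
        · rfl
      · intro k
        by_cases hk : k = pvK id1 x
        · rw [hk]
          have hmem' : pvK id1 x ∈ (l ++ [x]).map (pvK id1) := by
            rw [List.map_append]; exact List.mem_append_left _ hmem
          rw [if_pos hmem', hstep]
          rcases lt_trichotomy (pvV id2 x) (pvMax id1 id2 (pvK id1 x) l) with hlt | heq | hgt
          · rw [if_neg (not_lt.mpr (le_of_lt hlt)), if_neg (by simpa using ne_of_lt hlt),
              pvGrp_append_lt id1 id2 l x hmem hlt, hget]
          · rw [if_neg (not_lt.mpr (le_of_eq heq)), if_pos (by simpa using heq),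
              pvGrp_append_eq id1 id2 l x hmem heq, PySem.Dict.get?_insert, if_pos rfl]
          · rw [if_pos hgt, pvGrp_append_gt id1 id2 l x hmem hgt, PySem.Dict.get?_insert,
              if_pos rfl]
        · have hmm : k ∈ (l ++ [x]).map (pvK id1) ↔ k ∈ l.map (pvK id1) := by
            rw [List.map_append, List.map_singleton, List.mem_append, List.mem_singleton]
            exact ⟨fun h => h.resolve_right hk, Or.inl⟩
          rw [pvGrp_append_ne id1 id2 k l x (fun hc' => hk hc'.symm)]
          have hgoal : (if k ∈ (l ++ [x]).map (pvK id1) then some (pvGrp id1 id2 k l) else none)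
              = d.get? k := by
            rw [ihg]
            by_cases h : k ∈ l.map (pvK id1)
            · rw [if_pos h, if_pos (hmm.mpr h)]
            · rw [if_neg h, if_neg (fun hc' => h (hmm.mp hc'))]
          rw [hgoal, hstep]
          split_ifs with h1 h2
          · rw [PySem.Dict.get?_insert, if_neg hk]
          · rw [PySem.Dict.get?_insert, if_neg hk]
          · rfl
    · -- fresh key
      have hc : d.contains (pvK id1 x) = false := by
        cases h : d.contains (pvK id1 x)
        · rfl
        · exact absurd (hcont.mp h) hmem
      have hstep : select_c_step id1 id2 d x = d.insert (pvK id1 x) [x] := by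
        simp only [select_c_step]
        rw [show d.contains (PySem.List.pyGetD x id1 (0 : Int)) = false from hc]
        simp only [Bool.not_false, if_true]
        rfl
      refine ⟨?_, ?_⟩
      · rw [hstep, pv_keys_new, if_neg hmem, ← ihk]
        exact PySem.Dict.keys_insert_of_not_contains d _ hc
      · intro k
        by_cases hk : k = pvK id1 x
        · rw [hk]
          have hmem' : pvK id1 x ∈ (l ++ [x]).map (pvK id1) := by
            rw [List.map_append, List.map_singleton]
            exact List.mem_append_right _ List.mem_cons_self
          rw [if_pos hmem', hstep, PySem.Dict.get?_insert, if_pos rfl,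
            pvGrp_append_fresh id1 id2 l x hmem]
        · have hmm : k ∈ (l ++ [x]).map (pvK id1) ↔ k ∈ l.map (pvK id1) := by
            rw [List.map_append, List.map_singleton, List.mem_append, List.mem_singleton]
            exact ⟨fun h => h.resolve_right hk, Or.inl⟩
          rw [hstep, PySem.Dict.get?_insert, if_neg hk,
            pvGrp_append_ne id1 id2 k l x (fun hc' => hk hc'.symm), ihg]
          by_cases h : k ∈ l.map (pvK id1)
          · rw [if_pos h, if_pos (hmm.mpr h)]
          · rw [if_neg h, if_neg (fun hc' => h (hmm.mp hc'))]

-- ===== the invariant of B's first loop =====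
theorem pv_invT (id1 id2 : Int) (l : List (List Int)) :
    (l.foldl (select_c_alt_step1 id1 id2) PySem.Dict.empty).keys = PySem.Set.ofList (l.map (pvK id1)) ∧
    ∀ k, (l.foldl (select_c_alt_step1 id1 id2) PySem.Dict.empty).get? k =
      if k ∈ l.map (pvK id1) then some (pvMax id1 id2 k l) else none := by
  induction l using List.reverseRecOn with
  | nil => exact ⟨rfl, fun k => rfl⟩
  | append_singleton l x ih =>
    rcases ih with ⟨ihk, ihg⟩
    rw [List.foldl_append, List.foldl_cons, List.foldl_nil]
    set t := l.foldl (select_c_alt_step1 id1 id2) PySem.Dict.empty with ht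
    have hcont : t.contains (pvK id1 x) = true ↔ pvK id1 x ∈ l.map (pvK id1) := by
      rw [PySem.Dict.contains_iff_mem_keys, ihk, PySem.Set.mem_ofList]
    by_cases hmem : pvK id1 x ∈ l.map (pvK id1)
    · have hc : t.contains (pvK id1 x) = true := hcont.mpr hmem
      have hget : t.get? (pvK id1 x) = some (pvMax id1 id2 (pvK id1 x) l) := by
        rw [ihg, if_pos hmem]
      have hgetD' : t.getD (PySem.List.pyGetD x id1 (0 : Int)) 0 = pvMax id1 id2 (pvK id1 x) l :=
        PySem.Dict.getD_of_get?_eq_some t 0 hget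
      have hstep : select_c_alt_step1 id1 id2 t x =
          if pvV id2 x > pvMax id1 id2 (pvK id1 x) l then
            t.insert (pvK id1 x) (pvV id2 x)
          else t := by
        simp only [select_c_alt_step1]
        rw [show t.contains (PySem.List.pyGetD x id1 (0 : Int)) = true from hc]
        simp only [Bool.not_true, Bool.false_or]
        rw [hgetD']
        by_cases hgt : pvV id2 x > pvMax id1 id2 (pvK id1 x) l
        · rw [if_pos (by simpa using hgt), if_pos hgt]
          rfl
        · rw [if_neg (by simpa using hgt), if_neg hgt]
      refine ⟨?_, ?_⟩
      · rw [hstep, pv_keys_new, if_pos hmem, ← ihk]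
        split_ifs with h1
        · exact PySem.Dict.keys_insert_of_contains t _ hc
        · rfl
      · intro k
        by_cases hk : k = pvK id1 x
        · rw [hk]
          have hmem' : pvK id1 x ∈ (l ++ [x]).map (pvK id1) := by
            rw [List.map_append]; exact List.mem_append_left _ hmem
          have hmax : pvMax id1 id2 (pvK id1 x) (l ++ [x]) =
              max (pvMax id1 id2 (pvK id1 x) l) (pvV id2 x) := by
            rw [pvMax_append_self, if_pos hmem]
          rw [if_pos hmem', hstep, hmax]
          by_cases hgt : pvV id2 x > pvMax id1 id2 (pvK id1 x) l
          · rw [if_pos hgt, PySem.Dict.get?_insert, if_pos rfl, max_eq_right (le_of_lt hgt)]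
          · rw [if_neg hgt, max_eq_left (not_lt.mp hgt), hget]
        · have hmm : k ∈ (l ++ [x]).map (pvK id1) ↔ k ∈ l.map (pvK id1) := by
            rw [List.map_append, List.map_singleton, List.mem_append, List.mem_singleton]
            exact ⟨fun h => h.resolve_right hk, Or.inl⟩
          rw [pvMax_append_ne id1 id2 k l x (fun hc' => hk hc'.symm)]
          have hgoal : (if k ∈ (l ++ [x]).map (pvK id1) then some (pvMax id1 id2 k l) else none)
              = t.get? k := by
            rw [ihg]
            by_cases h : k ∈ l.map (pvK id1)
            · rw [if_pos h, if_pos (hmm.mpr h)]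
            · rw [if_neg h, if_neg (fun hc' => h (hmm.mp hc'))]
          rw [hgoal, hstep]
          split_ifs with h1
          · rw [PySem.Dict.get?_insert, if_neg hk]
          · rfl
    · have hc : t.contains (pvK id1 x) = false := by
        cases h : t.contains (pvK id1 x)
        · rfl
        · exact absurd (hcont.mp h) hmem
      have hstep : select_c_alt_step1 id1 id2 t x = t.insert (pvK id1 x) (pvV id2 x) := by
        simp only [select_c_alt_step1]
        rw [show t.contains (PySem.List.pyGetD x id1 (0 : Int)) = false from hc]
        simp only [Bool.not_false, Bool.true_or, if_true]
        rfl
      refine ⟨?_, ?_⟩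
      · rw [hstep, pv_keys_new, if_neg hmem, ← ihk]
        exact PySem.Dict.keys_insert_of_not_contains t _ hc
      · intro k
        by_cases hk : k = pvK id1 x
        · rw [hk]
          have hmem' : pvK id1 x ∈ (l ++ [x]).map (pvK id1) := by
            rw [List.map_append, List.map_singleton]
            exact List.mem_append_right _ List.mem_cons_self
          have hmax : pvMax id1 id2 (pvK id1 x) (l ++ [x]) = pvV id2 x := by
            rw [pvMax_append_self, if_neg hmem]
          rw [if_pos hmem', hstep, PySem.Dict.get?_insert, if_pos rfl, hmax]
        · have hmm : k ∈ (l ++ [x]).map (pvK id1) ↔ k ∈ l.map (pvK id1) := by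
            rw [List.map_append, List.map_singleton, List.mem_append, List.mem_singleton]
            exact ⟨fun h => h.resolve_right hk, Or.inl⟩
          rw [hstep, PySem.Dict.get?_insert, if_neg hk,
            pvMax_append_ne id1 id2 k l x (fun hc' => hk hc'.symm), ihg]
          by_cases h : k ∈ l.map (pvK id1)
          · rw [if_pos h, if_pos (hmm.mpr h)]
          · rw [if_neg h, if_neg (fun hc' => h (hmm.mp hc'))]

-- ===== the invariant of B's second loop (left induction, generalizing the dict) =====
theorem pv_invG (id1 id2 : Int) (table : PySem.Dict Int Int) (l : List (List Int))
    (g : PySem.Dict Int (List (List Int))) (k : Int) :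
    (l.foldl (select_c_alt_step2 id1 id2 table) g).getD k [] =
      g.getD k [] ++ l.filter (fun x =>
        (pvV id2 x == table.getD (pvK id1 x) 0) && (pvK id1 x == k)) := by
  induction l generalizing g with
  | nil => simp
  | cons x tl ih =>
    rw [List.foldl_cons, ih, List.filter_cons]
    by_cases hcond : pvV id2 x = table.getD (pvK id1 x) 0
    · have hstep : select_c_alt_step2 id1 id2 table g x =
          g.modify (pvK id1 x) [] (· ++ [x]) := by
        simp only [select_c_alt_step2]
        rw [if_pos (by simpa using hcond)]
        rfl
      rw [hstep, PySem.Dict.getD_modify]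
      by_cases hk : k = pvK id1 x
      · rw [if_pos hk, if_pos (by simp [hcond, hk.symm]), hk, List.append_assoc,
          List.singleton_append]
      · rw [if_neg hk,
          if_neg (by simp only [Bool.and_eq_true, beq_iff_eq, not_and]
                     exact fun _ hc => hk hc.symm)]
    · have hstep : select_c_alt_step2 id1 id2 table g x = g := by
        simp only [select_c_alt_step2]
        rw [if_neg (by simpa using hcond)]
      rw [hstep,
        if_neg (by simp only [Bool.and_eq_true, beq_iff_eq]
                   exact fun hc => hcond hc.1)]

-- ===== both results are the canonical 'concat the groups in key order' =====
theorem pv_A_eq_canon (id1 id2 : Int) (l : List (List Int)) :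
    select_c l id1 id2 =
      (PySem.Set.ofList (l.map (pvK id1))).foldl (fun res k => res ++ pvGrp id1 id2 k l) [] := by
  rcases pv_invA id1 id2 l with ⟨hk, hg⟩
  show (l.foldl (select_c_step id1 id2) PySem.Dict.empty).values.foldl (fun res v => res ++ v) [] = _
  set d := l.foldl (select_c_step id1 id2) PySem.Dict.empty with hd
  have hnd : d.keys.Nodup := by rw [hk]; exact PySem.Set.nodup_ofList _
  rw [PySem.Dict.values_eq_map_keys d hnd ([] : List (List Int)), List.foldl_map, hk]
  apply PySem.List.foldl_congr_mem
  intro acc k hkm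
  have : d.getD k [] = pvGrp id1 id2 k l := by
    apply PySem.Dict.getD_of_get?_eq_some
    rw [hg, if_pos ((PySem.Set.mem_ofList _ _).mp (hk ▸ hkm))]
  rw [this]

theorem pv_B_eq_canon (id1 id2 : Int) (l : List (List Int)) :
    select_c_alt l id1 id2 =
      (PySem.Set.ofList (l.map (pvK id1))).foldl (fun res k => res ++ pvGrp id1 id2 k l) [] := by
  rcases pv_invT id1 id2 l with ⟨hk, hg⟩
  show (l.foldl (select_c_alt_step1 id1 id2) PySem.Dict.empty).keys.foldl
      (fun res k => res ++ (l.foldl (select_c_alt_step2 id1 id2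
        (l.foldl (select_c_alt_step1 id1 id2) PySem.Dict.empty)) PySem.Dict.empty).getD k []) [] = _
  set t := l.foldl (select_c_alt_step1 id1 id2) PySem.Dict.empty with ht
  rw [hk]
  apply PySem.List.foldl_congr_mem
  intro acc k hkm
  have hkl : k ∈ l.map (pvK id1) := (PySem.Set.mem_ofList _ _).mp hkm
  rw [pv_invG id1 id2 t l PySem.Dict.empty k]
  have hfil : l.filter (fun x => (pvV id2 x == t.getD (pvK id1 x) 0) && (pvK id1 x == k)) =
      pvGrp id1 id2 k l := by
    rw [pvGrp]
    apply List.filter_congr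
    intro y hy
    by_cases hky : pvK id1 y = k
    · have : t.getD (pvK id1 y) 0 = pvMax id1 id2 k l := by
        apply PySem.Dict.getD_of_get?_eq_some
        rw [hky, hg, if_pos hkl]
      rw [this, hky]
      simp [Bool.and_comm]
    · rw [beq_eq_false_iff_ne.mpr hky, Bool.and_false, Bool.false_and]
  rw [hfil]
  simp

-- ===== VERDICT (by name: the statement is the Claim_ definition above) =====
theorem select_c_spec : Claim_equal_select_c := by
  intro sample_list id1 id2 _ _
  unfold Spec_select_c
  rw [pv_A_eq_canon, pv_B_eq_canon]
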